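-- pv_equiv track=rewrite | github.com/pypi-data/pypi-mirror-213 | packages/ciocore/ciocore-6.1.0-py2.py3-none-any.whl/ciocore/hardware_set.py | build_unique
-- ===== SOURCE A (Python) =====
-- def build_unique(instance_types):
--     """Build a dictionary of instance types using name as key.
--
--     Remove any instance types whose description has already been seen. We can't have duplicate
--     descriptions.
--     """
--     result = {}
--     seen_descriptions = set()
--     for it in instance_types:
--         if it["description"] in seen_descriptions:
--             continue
--         result[it["name"]] = it
--         seen_descriptions.add(it["description"])
--     return result
-- ===== SOURCE B (Python) =====
-- def build_unique(instance_types):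
--     """Build a dictionary of instance types using name as key.
--
--     Recursive nub: the first item always survives; every later item sharing its
--     description is filtered away, and the rest is handled by recursion."""
--     if not instance_types:
--         return {}
--     head = instance_types[0]
--     rest = [it for it in instance_types[1:]
--             if it["description"] != head["description"]]
--     result = {head["name"]: head}
--     result.update(build_unique(rest))
--     return result
-- ===== Notes on version B (the rewrite author's own statement) =====
-- stated objective: alternative
-- what changed: B replaces A's single loop with a seen-descriptions set by a recursive nub: keep the head, filter every later item with the head's description out of the tail, recurse on the remainder and merge with dict.update; no seen-set or auxiliary state is kept.
import Mathlib
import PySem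

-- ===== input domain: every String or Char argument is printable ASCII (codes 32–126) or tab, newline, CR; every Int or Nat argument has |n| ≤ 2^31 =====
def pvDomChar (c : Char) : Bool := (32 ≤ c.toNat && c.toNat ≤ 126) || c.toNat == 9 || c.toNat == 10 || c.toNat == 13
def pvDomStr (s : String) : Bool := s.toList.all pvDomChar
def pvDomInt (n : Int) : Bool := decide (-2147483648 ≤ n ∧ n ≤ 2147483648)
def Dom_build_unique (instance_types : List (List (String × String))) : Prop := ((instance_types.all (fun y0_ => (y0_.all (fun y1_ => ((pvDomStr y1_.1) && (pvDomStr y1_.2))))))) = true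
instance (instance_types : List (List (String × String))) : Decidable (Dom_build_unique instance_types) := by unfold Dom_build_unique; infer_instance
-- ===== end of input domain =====

-- B is a recursive nub: keep the head, filter later items with the head's description out
-- of the tail, recurse, and merge with dict.update — no seen-set, no auxiliary state.

-- lookup it[k] on an item dict; 'none' = KeyError (excluded by Pre_), total form defaults to ""
def pvItemGet? (it : List (String × String)) (k : String) : Option String :=
  (PySem.Dict.mk it).get? k

def pvItemGet (it : List (String × String)) (k : String) : String :=
  (pvItemGet? it k).getD ""

-- ===== PORT A =====
def build_unique (instance_types : List (List (String × String))) : List (String × List (String × String)) :=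
  (instance_types.foldl
    (fun (st : PySem.Dict String (List (String × String)) × PySem.Set String) it =>
      if PySem.Set.contains st.2 (pvItemGet it "description") then st
      else (st.1.insert (pvItemGet it "name") it,
            PySem.Set.add st.2 (pvItemGet it "description")))
    (PySem.Dict.empty, PySem.Set.empty)).1.items

-- ===== PORT B =====
def pvBuildB : List (List (String × String)) → PySem.Dict String (List (String × String))
  | [] => PySem.Dict.empty
  | head :: tail =>
    let rest := tail.filter
      (fun it => !decide (pvItemGet it "description" = pvItemGet head "description"))
    ((PySem.Dict.empty.insert (pvItemGet head "name") head).update (pvBuildB rest).items)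
termination_by its => its.length
decreasing_by
  simp only [List.length_cons, List.length_unattach]
  exact Nat.lt_succ_of_le (le_trans (List.length_filter_le _ _) (by simp))

def build_unique_alt (instance_types : List (List (String × String))) : List (String × List (String × String)) :=
  (pvBuildB instance_types).items

-- ===== PRECONDITION & SPEC =====
-- Pre_ excludes exactly the inputs on which A raises KeyError: an item without a
-- "description" key, or an item whose description is new (not seen on any earlier item)
-- but which has no "name" key.
def Pre_build_unique (instance_types : List (List (String × String))) : Prop :=
  ∀ i, i < instance_types.length →
    ("description" ∈ (instance_types[i]!).map Prod.fst) ∧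
    ((∀ j, j < i → (instance_types[j]!).lookup "description" ≠ (instance_types[i]!).lookup "description") →
      "name" ∈ (instance_types[i]!).map Prod.fst)

instance (instance_types : List (List (String × String))) : Decidable (Pre_build_unique instance_types) := by
  unfold Pre_build_unique; infer_instance

def pvWitness_build_unique : (List (List (String × String))) :=
  [[("name", "a"), ("description", "x")], [("name", "b"), ("description", "x")],
   [("name", "a"), ("description", "y")]]

def Spec_build_unique (instance_types : List (List (String × String))) (out : List (String × List (String × String))) : Prop := out = build_unique_alt instance_types
instance (instance_types : List (List (String × String))) (out : List (String × List (String × String))) : Decidable (Spec_build_unique instance_types out) := by unfold Spec_build_unique; infer_instance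

-- ===== CLAIM (what is proved, stated in full; the proofs are below) =====
def Claim_equal_build_unique : Prop := ∀ (instance_types : List (List (String × String))), Dom_build_unique instance_types → Pre_build_unique instance_types → Spec_build_unique instance_types (build_unique instance_types)

-- ===== LEMMAS AND PROOFS =====

-- abbreviation used throughout the proofs
def pvIns (d : PySem.Dict String (List (String × String)))
    (p : String × List (String × String)) : PySem.Dict String (List (String × String)) :=
  d.insert p.1 p.2

-- the items A keeps (first item per description), given the list s of descriptions already seen
def pvKept : List (List (String × String)) → List String → List (List (String × String))
  | [], _ => []
  | it :: rest, s =>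
    if pvItemGet it "description" ∈ s then pvKept rest s
    else it :: pvKept rest (s ++ [pvItemGet it "description"])

-- the items B keeps, by recursive filtering
def pvKeptF : List (List (String × String)) → List (List (String × String))
  | [] => []
  | h :: t =>
    h :: pvKeptF (t.filter
      (fun it => !decide (pvItemGet it "description" = pvItemGet h "description")))
termination_by its => its.length
decreasing_by
  simp only [List.length_cons, List.length_unattach]
  exact Nat.lt_succ_of_le (le_trans (List.length_filter_le _ _) (by simp))

-- A's loop inserts exactly the kept items
theorem pvLoopA (its : List (List (String × String)))
    (r : PySem.Dict String (List (String × String))) (s : PySem.Set String) :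
    (its.foldl
      (fun (st : PySem.Dict String (List (String × String)) × PySem.Set String) it =>
        if PySem.Set.contains st.2 (pvItemGet it "description") then st
        else (st.1.insert (pvItemGet it "name") it,
              PySem.Set.add st.2 (pvItemGet it "description")))
      (r, s)).1
    = (pvKept its s).foldl
        (fun (r : PySem.Dict String (List (String × String))) it =>
          r.insert (pvItemGet it "name") it) r := by
  induction its generalizing r s with
  | nil => rfl
  | cons it rest ih =>
    rw [List.foldl_cons]
    by_cases h : pvItemGet it "description" ∈ s
    · have hc : PySem.Set.contains s (pvItemGet it "description") = true :=
        (PySem.Set.contains_iff s _).mpr h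
      simp only [pvKept, hc, if_true, h]
      exact ih r s
    · have hc : PySem.Set.contains s (pvItemGet it "description") = false := by
        rw [Bool.eq_false_iff]
        exact fun hm => h ((PySem.Set.contains_iff s _).mp hm)
      have hadd : PySem.Set.add s (pvItemGet it "description")
          = s ++ [pvItemGet it "description"] := PySem.Set.add_of_not_mem h
      simp only [pvKept, hc, Bool.false_eq_true, if_false, hadd, h, List.foldl_cons]
      exact ih _ _

-- the filter-based kept list equals A's seen-set kept list
theorem pvKeptF_filter (its : List (List (String × String))) :
    ∀ s : List String,
      pvKeptF (its.filter (fun it => !decide (pvItemGet it "description" ∈ s)))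
        = pvKept its s := by
  induction its with
  | nil => intro s; simp [pvKeptF, pvKept]
  | cons h t ih =>
    intro s
    by_cases hm : pvItemGet h "description" ∈ s
    · rw [List.filter_cons_of_neg (by simp [hm])]
      simp only [pvKept, hm, if_true]
      exact ih s
    · rw [List.filter_cons_of_pos (by simp [hm])]
      rw [pvKeptF, List.filter_filter]
      simp only [pvKept, hm, if_false]
      have hfe : (t.filter (fun it =>
            (!decide (pvItemGet it "description" = pvItemGet h "description")) &&
            (!decide (pvItemGet it "description" ∈ s))))
          = t.filter (fun it =>
            !decide (pvItemGet it "description" ∈ s ++ [pvItemGet h "description"])) := by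
        apply List.filter_congr
        intro a _
        by_cases h1 : pvItemGet a "description" ∈ s <;>
          by_cases h2 : pvItemGet a "description" = pvItemGet h "description" <;>
          simp [h1, h2]
      rw [hfe, ih]

-- get? after a left fold of inserts: last matching pair wins, else the base dict
theorem pvGetFold (ks : List (String × List (String × String))) :
    ∀ (d : PySem.Dict String (List (String × String))) (x : String),
      (ks.foldl pvIns d).get? x
        = ((ks.reverse.find? (fun p => p.1 == x)).map Prod.snd).or (d.get? x) := by
  induction ks with
  | nil => intro d x; simp
  | cons p t ih =>
    intro d x
    rw [List.foldl_cons, ih, List.reverse_cons, List.find?_append]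
    cases hf : t.reverse.find? (fun q => q.1 == x) with
    | some q => simp
    | none =>
      by_cases hx : x = p.1
      · subst hx
        simp [pvIns, PySem.Dict.get?_insert_self, List.find?]
      · have hb : (p.1 == x) = false := beq_eq_false_iff_ne.mpr (fun h => hx h.symm)
        simp [List.find?, hb, pvIns,
          PySem.Dict.get?_insert_of_ne _ _ (fun h => hx h)]

-- with unique keys, searching from the back equals searching from the front
theorem pvFindRev (l : List (String × List (String × String)))
    (hnd : (l.map Prod.fst).Nodup) (x : String) :
    l.reverse.find? (fun p => p.1 == x) = l.find? (fun p => p.1 == x) := by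
  induction l with
  | nil => rfl
  | cons p t ih =>
    simp only [List.map_cons, List.nodup_cons] at hnd
    rw [List.reverse_cons, List.find?_append, ih hnd.2]
    by_cases hx : p.1 = x
    · subst hx
      have hnone : t.find? (fun q => q.1 == p.1) = none := by
        rw [List.find?_eq_none]
        intro q hq
        simp only [beq_iff_eq]
        intro he
        exact hnd.1 (he ▸ List.mem_map_of_mem hq)
      simp [hnone, List.find?]
    · have hb : (p.1 == x) = false := by simpa using hx
      cases hf : t.find? (fun q => q.1 == x) with
      | some q => simp [hf, List.find?, hb]
      | none => simp [hf, List.find?, hb]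

-- keys of a left fold of inserts
theorem pvKeysFold (ks : List (String × List (String × String)))
    (d : PySem.Dict String (List (String × String))) :
    (ks.foldl pvIns d).keys = PySem.Set.update d.keys (ks.map Prod.fst) := by
  have := PySem.Dict.keys_foldl_insert_key (key := Prod.fst)
    (f := fun (_ : PySem.Dict String (List (String × String)))
            (p : String × List (String × String)) => p.2) (d := d) (l := ks)
  simpa [pvIns] using this

-- Set.update absorbs an ofList on the right
theorem pvUpdateOfList (s : List String) (l : List String) :
    PySem.Set.update s (PySem.Set.ofList l) = PySem.Set.update s l := by
  rw [PySem.Set.update_eq_append_filter, PySem.Set.update_eq_append_filter]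
  have : PySem.Set.ofList (PySem.Set.ofList l) = PySem.Set.ofList l := by
    rw [← PySem.Set.update_nil_left,
      PySem.Set.update_eq_append_of_disjoint _ _ (PySem.Set.nodup_ofList l) (by simp),
      List.nil_append]
  rw [this]

-- folding the items of a fold-built dict over a base dict = folding the pairs directly
theorem pvFoldItems (ks : List (String × List (String × String)))
    (d : PySem.Dict String (List (String × String))) (hd : d.keys.Nodup) :
    ((ks.foldl pvIns PySem.Dict.empty).items.foldl pvIns d) = ks.foldl pvIns d := by
  have hkin : (ks.foldl pvIns PySem.Dict.empty).keys
      = PySem.Set.ofList (ks.map Prod.fst) := by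
    rw [pvKeysFold]
    simp [PySem.Set.update_nil_left, PySem.Dict.keys_empty]
  have hndin : (ks.foldl pvIns PySem.Dict.empty).keys.Nodup := by
    rw [hkin]; exact PySem.Set.nodup_ofList _
  have hkeys : ((ks.foldl pvIns PySem.Dict.empty).items.foldl pvIns d).keys
      = (ks.foldl pvIns d).keys := by
    rw [pvKeysFold, pvKeysFold]
    have : (ks.foldl pvIns PySem.Dict.empty).items.map Prod.fst
        = (ks.foldl pvIns PySem.Dict.empty).keys := rfl
    rw [this, hkin, pvUpdateOfList]
  have hget : ∀ x, ((ks.foldl pvIns PySem.Dict.empty).items.foldl pvIns d).get? x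
      = (ks.foldl pvIns d).get? x := by
    intro x
    rw [pvGetFold, pvGetFold]
    have hndit : ((ks.foldl pvIns PySem.Dict.empty).items.map Prod.fst).Nodup := hndin
    rw [pvFindRev _ hndit x]
    have hinner : ((ks.foldl pvIns PySem.Dict.empty).items.find?
        (fun p => p.1 == x)).map Prod.snd
        = (ks.foldl pvIns PySem.Dict.empty).get? x := rfl
    rw [hinner, pvGetFold]
    simp [PySem.Dict.get?_empty]
  have hndl : ((ks.foldl pvIns PySem.Dict.empty).items.foldl pvIns d).keys.Nodup := by
    rw [hkeys, pvKeysFold]; exact PySem.Set.nodup_update _ _ hd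
  have hndr : (ks.foldl pvIns d).keys.Nodup := by
    rw [pvKeysFold]; exact PySem.Set.nodup_update _ _ hd
  apply PySem.Dict.ext
  rw [PySem.Dict.items_eq_map_keys _ hndl [], PySem.Dict.items_eq_map_keys _ hndr [],
    hkeys]
  apply List.map_congr_left
  intro k _
  rw [PySem.Dict.getD_eq_get?_getD, PySem.Dict.getD_eq_get?_getD, hget]

-- B's recursion builds the fold of its kept items
theorem pvBuildB_eq (its : List (List (String × String))) :
    pvBuildB its = ((pvKeptF its).map
      (fun it => (pvItemGet it "name", it))).foldl pvIns PySem.Dict.empty := by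
  induction hn : its.length using Nat.strong_induction_on generalizing its with
  | _ n ih =>
    cases its with
    | nil => simp [pvBuildB, pvKeptF]
    | cons h t =>
      rw [pvBuildB, pvKeptF]
      have hlen : (t.filter (fun it =>
          !decide (pvItemGet it "description" = pvItemGet h "description"))).length < n := by
        subst hn
        simp only [List.length_cons]
        exact Nat.lt_succ_of_le (List.length_filter_le _ _)
      rw [ih _ hlen _ rfl]
      have hupd : ∀ (d : PySem.Dict String (List (String × String)))
          (ps : List (String × List (String × String))),
          d.update ps = ps.foldl pvIns d := fun _ _ => rfl
      rw [hupd]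
      rw [pvFoldItems _ _ (by
        exact PySem.Dict.nodup_keys_insert _ _ _ PySem.Dict.nodup_keys_empty)]
      simp only [List.map_cons, List.foldl_cons]
      rfl

-- ===== VERDICT (by name: the statement is the Claim_ definition above) =====
theorem build_unique_spec : Claim_equal_build_unique := by
  intro its _ _
  unfold Spec_build_unique build_unique build_unique_alt
  rw [pvLoopA, pvBuildB_eq]
  have hkept : pvKeptF its = pvKept its [] := by
    have := pvKeptF_filter its []
    simpa using this
  rw [hkept, List.foldl_map]
  rfl
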